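-- pv_equiv track=rewrite | github.com/Egor-05/konfig | hw4/assembler.py | encode_read
-- ===== SOURCE A (Python) =====
-- def encode_read(string):
--     bit_string = '001100'
--     log = {'A': 12, 'B': int(string[1]), 'C': int(string[2])}
--     bit_string += bin(int(string[1]))[2:].rjust(27, '0')[::-1]
--     bit_string += bin(int(string[2]))[2:].rjust(27, '0')[::-1]
--     bit_string = bit_string.ljust(96, '0')
--     array = [int(bit_string[8 * i: 8 * i + 8], 2) for i in range(12)]
--     return array, log
-- ===== SOURCE B (Python) =====
-- def _rev27(v):
--     r = 0
--     for _ in range(27):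
--         r = (r << 1) | (v & 1)
--         v >>= 1
--     return r
--
-- def encode_read(string):
--     b = int(string[1])
--     c = int(string[2])
--     log = {'A': 12, 'B': b, 'C': c}
--     n = (0b001100 << 90) | (_rev27(b) << 63) | (_rev27(c) << 36)
--     return list(n.to_bytes(12, 'big')), log
-- ===== Notes on version B (the rewrite author's own statement) =====
-- stated objective: alternative
-- what changed: B drops A's 96-character bit-string building, ljust padding and per-byte string slicing/int(...,2) parsing, computing instead the 96-bit word directly with integer bit arithmetic (a 27-step bit-reversal loop, shifts and ORs) and emitting the bytes via a 12-byte big-endian integer-to-bytes conversion.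
import Mathlib
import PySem

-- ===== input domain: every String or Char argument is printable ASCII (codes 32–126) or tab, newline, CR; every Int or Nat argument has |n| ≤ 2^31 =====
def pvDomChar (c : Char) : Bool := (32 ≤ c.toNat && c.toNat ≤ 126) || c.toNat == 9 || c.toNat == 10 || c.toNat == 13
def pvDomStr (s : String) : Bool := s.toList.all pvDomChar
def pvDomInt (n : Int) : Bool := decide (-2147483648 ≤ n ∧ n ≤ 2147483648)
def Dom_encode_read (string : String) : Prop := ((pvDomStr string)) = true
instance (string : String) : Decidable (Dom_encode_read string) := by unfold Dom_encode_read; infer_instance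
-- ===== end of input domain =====

-- B replaces A's 96-character bit-string formatting/slicing by integer bit arithmetic
-- (reversed 27-bit fields OR-ed into one 96-bit integer, bytes extracted from the integer): objective = alternative.

-- ===== PORT A =====

-- bin(n)[2:] for 0 ≤ n (fuel-bounded halving loop; fuel 64 covers every value reached here)
def pvBinGo : Nat → Nat → List Char → List Char
  | 0, _, acc => acc
  | _, 0, acc => acc
  | f+1, n, acc => pvBinGo f (n / 2) ((if n % 2 = 1 then '1' else '0') :: acc)

def pvBinChars (n : Nat) : List Char := if n = 0 then ['0'] else pvBinGo 64 n []

-- the body of A once the two int(string[i]) succeeded (vb = int(string[1]), vc = int(string[2]))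
def pvBodyA (vb vc : Int) : List Int × (List (String × Int)) :=
  -- log = {'A': 12, 'B': vb, 'C': vc}
  let log := ((PySem.Dict.empty.insert "A" (12 : Int)).insert "B" vb).insert "C" vc
  -- bit_string = '001100' + bin(vb)[2:].rjust(27,'0')[::-1] + bin(vc)[2:].rjust(27,'0')[::-1]  ([::-1] is exact list reversal)
  let rb := pvBinChars vb.toNat
  let rc := pvBinChars vc.toNat
  let bits0 := ['0','0','1','1','0','0']
      ++ (List.replicate (27 - rb.length) '0' ++ rb).reverse
      ++ (List.replicate (27 - rc.length) '0' ++ rc).reverse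
  -- bit_string = bit_string.ljust(96, '0')
  let bits := bits0 ++ List.replicate (96 - bits0.length) '0'
  -- array = [int(bit_string[8*i : 8*i+8], 2) for i in range(12)]  (the slice is '0'/'1' chars, so int() never raises here)
  let array := (PySem.List.pyRange 0 12 1).map
    (fun i => (PySem.Int.ofCharsBase? (PySem.List.slice bits (some (8*i)) (some (8*i+8))) 2).getD 0)
  (array, log.items)

def encode_read (string : String) : List Int × (List (String × Int)) :=
  match PySem.Str.pyGet? string 1, PySem.Str.pyGet? string 2 with
  | some b, some c =>
    match PySem.Int.ofChars? [b], PySem.Int.ofChars? [c] with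
    | some vb, some vc => pvBodyA vb vc
    | _, _ => ([], [])        -- int() ValueError: outside Pre_
  | _, _ => ([], [])          -- IndexError: outside Pre_

-- ===== PORT B =====

-- _rev27: 27-step bit-reversal loop
def pvRev27 (v : Int) : Int :=
  ((PySem.List.pyRange 0 27 1).foldl
    (fun (p : Int × Int) _ => (PySem.Int.bor (p.1 <<< 1) (PySem.Int.band p.2 1), p.2 >>> 1))
    (0, v)).1

-- body of B once the two int() succeeded
def pvBodyB (b c : Int) : List Int × (List (String × Int)) :=
  let log := ((PySem.Dict.empty.insert "A" (12 : Int)).insert "B" b).insert "C" c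
  let n := PySem.Int.bor (PySem.Int.bor ((12 : Int) <<< 90) (pvRev27 b <<< 63)) (pvRev27 c <<< 36)
  -- the 12-byte big-endian bytes conversion ported as big-endian byte extraction by shift/mask (exact here: 0 ≤ n < 2^96)
  (((PySem.List.pyRange 0 12 1).map (fun i => PySem.Int.band (n >>> (8 * (11 - i)).toNat) 255)), log.items)

def encode_read_alt (string : String) : List Int × (List (String × Int)) :=
  -- b = int(string[1]); c = int(string[2])  (each line raises outside Pre_: ported as nested matches)
  match PySem.Str.pyGet? string 1 with
  | none => ([], [])
  | some bc =>
    match PySem.Int.ofChars? [bc] with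
    | none => ([], [])
    | some b =>
      match PySem.Str.pyGet? string 2 with
      | none => ([], [])
      | some cc =>
        match PySem.Int.ofChars? [cc] with
        | none => ([], [])
        | some c => pvBodyB b c

-- ===== PRECONDITION & SPEC =====
-- Pre_ excludes exactly the inputs where A raises: strings shorter than 3 (IndexError from string[1]/string[2])
-- and strings whose characters at positions 1 or 2 are not decimal digits (ValueError from int()).
def Pre_encode_read (string : String) : Prop :=
  3 ≤ string.toList.length
    ∧ PySem.Chars.isdigit (string.toList.getD 1 ' ') = true
    ∧ PySem.Chars.isdigit (string.toList.getD 2 ' ') = true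
instance (string : String) : Decidable (Pre_encode_read string) := by unfold Pre_encode_read; infer_instance

def pvWitness_encode_read : String := "x12"

def Spec_encode_read (string : String) (out : List Int × (List (String × Int))) : Prop := out = encode_read_alt string
instance (string : String) (out : List Int × (List (String × Int))) : Decidable (Spec_encode_read string out) := by unfold Spec_encode_read; infer_instance

-- ===== CLAIM (what is proved, stated in full; the proofs are below) =====
def Claim_equal_encode_read : Prop := ∀ (string : String), Dom_encode_read string → Pre_encode_read string → Spec_encode_read string (encode_read string)

-- ===== LEMMAS AND PROOFS =====

-- proof-side abbreviations
def pvDigits : List Char := ['0','1','2','3','4','5','6','7','8','9']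
def pvDigitsI : List Int := [0,1,2,3,4,5,6,7,8,9]
def pvP (l : List Char) : Int := (PySem.Int.ofCharsBase? l 2).getD 0
def pvZ8 : List Char := ['0','0','0','0','0','0','0','0']
-- per-digit byte tables (values A produces in bytes 0, 1 and 4) and the rev27 table
def pvByte0T (v : Int) : Int := ([48,50,49,51,48,50,49,51,48,50] : List Int).getD v.toNat 0
def pvByte1T (v : Int) : Int := ([0,0,0,0,128,128,128,128,64,64] : List Int).getD v.toNat 0
def pvByte4T (v : Int) : Int := ([0,64,32,96,16,80,48,112,8,72] : List Int).getD v.toNat 0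
def pvRevT (v : Int) : Int :=
  ([0,67108864,33554432,100663296,16777216,83886080,50331648,117440512,8388608,75497472] : List Int).getD v.toNat 0
def pvNExpr (rb rc : Int) : List Int :=
  (PySem.List.pyRange 0 12 1).map
    (fun i => PySem.Int.band
      ((PySem.Int.bor (PySem.Int.bor ((12 : Int) <<< 90) (rb <<< 63)) (rc <<< 36)) >>> (8 * (11 - i)).toNat) 255)

lemma pv_isdigit_mem (c : Char) (h : PySem.Chars.isdigit c = true) : c ∈ pvDigits := by
  simp [PySem.Chars.isdigit, Char.le_def, UInt32.le_iff_toNat_le] at h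
  obtain ⟨h1, h2⟩ := h
  have hv : c.toNat = 48 ∨ c.toNat = 49 ∨ c.toNat = 50 ∨ c.toNat = 51 ∨
      c.toNat = 52 ∨ c.toNat = 53 ∨ c.toNat = 54 ∨ c.toNat = 55 ∨
      c.toNat = 56 ∨ c.toNat = 57 := by omega
  have hc : ∀ n, c.toNat = n → c = Char.ofNat n := by
    intro n hn
    subst hn
    exact (Char.ofNat_toNat c).symm
  rcases hv with h|h|h|h|h|h|h|h|h|h <;> rw [hc _ h] <;> decide

set_option maxRecDepth 4000 in
lemma pv_charVal : ∀ ch ∈ pvDigits,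
    PySem.Int.ofChars? [ch] = some ((ch.toNat : Int) - 48) ∧ ((ch.toNat : Int) - 48) ∈ pvDigitsI := by
  intro ch h
  fin_cases h <;> exact ⟨by decide, by decide⟩

set_option maxRecDepth 4000 in
lemma pv_bodyA_slice (b c : Int) (a0 a1 a2 a3 c0 c1 c2 c3 : Char)
    (hb : (List.replicate (27 - (pvBinChars b.toNat).length) '0' ++ pvBinChars b.toNat).reverse
      = [a0,a1,a2,a3] ++ List.replicate 23 '0')
    (hc : (List.replicate (27 - (pvBinChars c.toNat).length) '0' ++ pvBinChars c.toNat).reverse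
      = [c0,c1,c2,c3] ++ List.replicate 23 '0') :
    pvBodyA b c =
      ([pvP ['0','0','1','1','0','0',a0,a1], pvP [a2,a3,'0','0','0','0','0','0'],
        pvP pvZ8, pvP pvZ8, pvP ['0',c0,c1,c2,c3,'0','0','0'],
        pvP pvZ8, pvP pvZ8, pvP pvZ8, pvP pvZ8, pvP pvZ8, pvP pvZ8, pvP pvZ8],
       [("A", 12), ("B", b), ("C", c)]) := by
  simp only [pvBodyA, hb, hc]
  rfl

lemma pv_bodyB_eq (b c rb rc : Int) (hb : pvRev27 b = rb) (hc : pvRev27 c = rc) :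
    pvBodyB b c = (pvNExpr rb rc, [("A", 12), ("B", b), ("C", c)]) := by
  simp only [pvBodyB, hb, hc]
  rfl

-- per-digit facts: shape of the reversed 27-bit field, the three byte values A's slices parse to,
-- and the value of B's bit-reversal loop
set_option maxRecDepth 4000 in
lemma pv_digitFacts : ∀ v ∈ pvDigitsI, ∃ a0 a1 a2 a3 : Char,
    (List.replicate (27 - (pvBinChars v.toNat).length) '0' ++ pvBinChars v.toNat).reverse
      = [a0,a1,a2,a3] ++ List.replicate 23 '0'
    ∧ pvP ['0','0','1','1','0','0',a0,a1] = pvByte0T v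
    ∧ pvP [a2,a3,'0','0','0','0','0','0'] = pvByte1T v
    ∧ pvP ['0',a0,a1,a2,a3,'0','0','0'] = pvByte4T v
    ∧ pvRev27 v = pvRevT v := by
  intro v hv
  fin_cases hv
  · exact ⟨'0', '0', '0', '0', by decide, by decide, by decide, by decide, by decide⟩
  · exact ⟨'1', '0', '0', '0', by decide, by decide, by decide, by decide, by decide⟩
  · exact ⟨'0', '1', '0', '0', by decide, by decide, by decide, by decide, by decide⟩
  · exact ⟨'1', '1', '0', '0', by decide, by decide, by decide, by decide, by decide⟩
  · exact ⟨'0', '0', '1', '0', by decide, by decide, by decide, by decide, by decide⟩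
  · exact ⟨'1', '0', '1', '0', by decide, by decide, by decide, by decide, by decide⟩
  · exact ⟨'0', '1', '1', '0', by decide, by decide, by decide, by decide, by decide⟩
  · exact ⟨'1', '1', '1', '0', by decide, by decide, by decide, by decide, by decide⟩
  · exact ⟨'0', '0', '0', '1', by decide, by decide, by decide, by decide, by decide⟩
  · exact ⟨'1', '0', '0', '1', by decide, by decide, by decide, by decide, by decide⟩

set_option maxRecDepth 4000 in
lemma pv_pz : pvP pvZ8 = 0 := by decide

set_option maxRecDepth 4000 in
lemma pv_BB : ∀ vb ∈ pvDigitsI, ∀ vc ∈ pvDigitsI,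
    pvNExpr (pvRevT vb) (pvRevT vc) =
      [pvByte0T vb, pvByte1T vb, 0, 0, pvByte4T vc, 0, 0, 0, 0, 0, 0, 0] := by
  intro vb hb vc hc
  fin_cases hb <;> fin_cases hc <;> decide

-- ===== VERDICT (by name: the statement is the Claim_ definition above) =====
theorem encode_read_spec : Claim_equal_encode_read := by
  intro s _ hpre
  obtain ⟨hlen, h1, h2⟩ := hpre
  rcases hl : s.toList with _ | ⟨a, _ | ⟨b, _ | ⟨c, t⟩⟩⟩ <;> rw [hl] at hlen <;> simp at hlen
  rw [hl] at h1 h2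
  simp only [List.getD, List.getElem?_cons_succ, List.getElem?_cons_zero, Option.getD_some] at h1 h2
  have hg1 : PySem.Str.pyGet? s 1 = some b := by simp [pysem, hl]
  have hg2 : PySem.Str.pyGet? s 2 = some c := by simp [pysem, hl]
  obtain ⟨hv1, hm1⟩ := pv_charVal b (pv_isdigit_mem b h1)
  obtain ⟨hv2, hm2⟩ := pv_charVal c (pv_isdigit_mem c h2)
  show encode_read s = encode_read_alt s
  rw [encode_read, encode_read_alt, hg1, hg2]
  simp only [hv1, hv2]
  obtain ⟨a0, a1, a2, a3, hshb, hp0, hp1, _, hrevb⟩ := pv_digitFacts _ hm1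
  obtain ⟨c0, c1, c2, c3, hshc, _, _, hp4, hrevc⟩ := pv_digitFacts _ hm2
  rw [pv_bodyA_slice _ _ _ _ _ _ _ _ _ _ hshb hshc, pv_bodyB_eq _ _ _ _ hrevb hrevc,
      hp0, hp1, hp4, pv_pz, pv_BB _ hm1 _ hm2]
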